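-- pv_equiv track=rewrite | github.com/gabrielheringer94-eng/out-app-gupy | _preprocess_piloto.py | apply_ffill
-- ===== SOURCE A (Python) =====
-- def apply_ffill(row, ff, ff_cols):
--     new_row = list(row)
--     max_col = max(ff_cols) if ff_cols else -1
--     if max_col >= len(new_row):
--         new_row.extend([None] * (max_col + 1 - len(new_row)))
--     for k, col in enumerate(ff_cols):
--         v = new_row[col]
--         if v is not None and str(v).strip() != "":
--             ff[col] = str(v).strip()
--             for kk in range(k + 1, len(ff_cols)):
--                 ff[ff_cols[kk]] = ""
--     for col in ff_cols:
--         v = new_row[col]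
--         if v is None or str(v).strip() == "":
--             new_row[col] = ff.get(col, "")
--     return new_row
-- ===== SOURCE B (Python) =====
-- def apply_ffill(row, ff, ff_cols):
--     # B: running-maximum extension, then ONE left-to-right dict pass with a
--     # seen-a-value flag (instead of A's nested clear-every-later-column rescan
--     # at each non-empty cell), then the fill pass.
--     # Like A, mutates the dict `ff` in place; the equivalence is about the return value.
--     L = len(row)
--     for c in ff_cols:
--         if L < c + 1:
--             L = c + 1
--     new_row = row + [None] * (L - len(row))
--     seen = False
--     for c in ff_cols:
--         v = new_row[c]
--         s = str(v).strip() if v is not None else ""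
--         if s != "":
--             ff[c] = s
--             seen = True
--         elif seen:
--             ff[c] = ""
--     for c in ff_cols:
--         cur = new_row[c]
--         if cur is None or not str(cur).strip():
--             new_row[c] = ff.get(c, "")
--     return new_row
-- ===== Notes on version B (the rewrite author's own statement) =====
-- stated objective: faster
-- what changed: A re-clears every later forward-fill column at each non-empty cell (nested loop, quadratic dict writes in len(ff_cols)); B computes the extension length by a running maximum and makes one left-to-right pass with a seen-a-value flag, resetting each later empty column's carry exactly once.
import Mathlib
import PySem

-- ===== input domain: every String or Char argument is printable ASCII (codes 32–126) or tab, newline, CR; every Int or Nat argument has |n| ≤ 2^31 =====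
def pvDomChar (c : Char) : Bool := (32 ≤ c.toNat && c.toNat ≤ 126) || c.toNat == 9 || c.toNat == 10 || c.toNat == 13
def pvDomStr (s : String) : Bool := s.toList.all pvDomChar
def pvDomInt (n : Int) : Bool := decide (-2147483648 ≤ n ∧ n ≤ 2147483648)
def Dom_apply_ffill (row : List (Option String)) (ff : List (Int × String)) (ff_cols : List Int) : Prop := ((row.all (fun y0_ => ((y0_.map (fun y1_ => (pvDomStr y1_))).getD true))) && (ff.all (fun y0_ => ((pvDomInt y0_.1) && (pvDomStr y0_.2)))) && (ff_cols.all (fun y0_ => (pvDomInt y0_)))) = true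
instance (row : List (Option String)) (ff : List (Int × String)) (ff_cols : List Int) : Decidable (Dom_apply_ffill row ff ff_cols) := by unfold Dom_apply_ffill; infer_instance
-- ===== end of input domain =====

-- B replaces A's nested "clear every later ff column at each non-empty cell" rescan by one
-- left-to-right pass with a seen-a-value flag (asymptotically fewer dict writes), and computes
-- the extension length by a running maximum. Both A and B mutate the dict `ff` in place in
-- Python; the equivalence proved here is about the RETURN value (the new row) only.

-- ===== PORT A =====
-- inner loop 'for kk in range(k+1, len(ff_cols)): ff[ff_cols[kk]] = ""': the cells
-- ff_cols[k+1:] it indexes are exactly `rest`, the tail of the structural recursion below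
def pvClearRestA (ff : PySem.Dict Int String) (rest : List Int) : PySem.Dict Int String :=
  rest.foldl (fun d c => d.insert c "") ff

-- 'for k, col in enumerate(ff_cols): v = new_row[col]; if v is not None and str(v).strip() != "": …'
def pvFfLoopA (nr : List (Option String)) : PySem.Dict Int String → List Int → PySem.Dict Int String
  | ff, [] => ff
  | ff, col :: rest =>
    let v := PySem.List.pyGetD nr col none          -- v = new_row[col]; IndexError excluded by Pre_
    pvFfLoopA nr
      (if v ≠ none ∧ PySem.Str.strip (v.getD "") ≠ "" then
        pvClearRestA (ff.insert col (PySem.Str.strip (v.getD ""))) rest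
      else ff) rest

-- 'for col in ff_cols: v = new_row[col]; if v is None or str(v).strip() == "": new_row[col] = ff.get(col, "")'
def pvFillLoopA (ff : PySem.Dict Int String) (cols : List Int) (nr : List (Option String)) : List (Option String) :=
  cols.foldl (fun nr col =>
    let v := PySem.List.pyGetD nr col none
    if v = none ∨ PySem.Str.strip (v.getD "") = "" then
      PySem.List.pySetD nr col (some (ff.getD col "")) else nr) nr

def apply_ffill (row : List (Option String)) (ff : List (Int × String)) (ff_cols : List Int) : List (Option String) :=
  let new_row := row
  let max_col : Int := match PySem.List.max? ff_cols (fun x => x) with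
    | some m => m
    | none => -1
  let new_row := if (new_row.length : Int) ≤ max_col then
      new_row ++ List.replicate (max_col + 1 - (new_row.length : Int)).toNat none
    else new_row
  pvFillLoopA (pvFfLoopA new_row (PySem.Dict.ofList ff) ff_cols) ff_cols new_row

-- ===== PORT B =====
-- 'L = len(row); for c in ff_cols: if L < c + 1: L = c + 1' — running maximum
def pvExtLenB : Int → List Int → Int
  | L, [] => L
  | L, c :: rest => pvExtLenB (if L < c + 1 then c + 1 else L) rest

-- single pass, state (ff, seen): a non-empty cell records its stripped value and sets `seen`;
-- an empty cell after a non-empty one resets its own carry once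
def pvFfLoopB (nr : List (Option String)) : PySem.Dict Int String × Bool → List Int → PySem.Dict Int String × Bool
  | st, [] => st
  | (ff, seen), c :: rest =>
    let s := match PySem.List.pyGetD nr c none with
      | none => ""
      | some t => PySem.Str.strip t
    pvFfLoopB nr
      (if s ≠ "" then (ff.insert c s, true)
       else if seen then (ff.insert c "", seen)
       else (ff, seen)) rest

-- 'for c in ff_cols: cur = new_row[c]; if cur is None or not str(cur).strip(): new_row[c] = ff.get(c, "")'
def pvFillLoopB (ff : PySem.Dict Int String) : List Int → List (Option String) → List (Option String)
  | [], nr => nr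
  | c :: rest, nr =>
    pvFillLoopB ff rest
      (match PySem.List.pyGetD nr c none with
       | none => PySem.List.pySetD nr c (some (ff.getD c ""))
       | some t =>
         if PySem.Str.strip t = "" then PySem.List.pySetD nr c (some (ff.getD c "")) else nr)

def apply_ffill_alt (row : List (Option String)) (ff : List (Int × String)) (ff_cols : List Int) : List (Option String) :=
  let L := pvExtLenB (row.length : Int) ff_cols
  let new_row := row ++ List.replicate (L - (row.length : Int)).toNat none
  pvFillLoopB (pvFfLoopB new_row (PySem.Dict.ofList ff, false) ff_cols).1 ff_cols new_row

-- ===== PRECONDITION & SPEC =====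
-- Pre_ excludes exactly the inputs where Python A raises IndexError: some col in ff_cols
-- is below -L, where L is the length of the row after its extension to max(ff_cols)+1.
def Pre_apply_ffill (row : List (Option String)) (ff : List (Int × String)) (ff_cols : List Int) : Prop :=
  ∀ c ∈ ff_cols, -(max (row.length : Int) (PySem.List.maxD ff_cols (fun x => x) (-1) + 1)) ≤ c
instance (row : List (Option String)) (ff : List (Int × String)) (ff_cols : List Int) : Decidable (Pre_apply_ffill row ff ff_cols) := by unfold Pre_apply_ffill; infer_instance

def pvWitness_apply_ffill : List (Option String) × (List (Int × String)) × List Int :=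
  ([some " a ", some "", none], [(2, "z")], [0, 1, 2, 3])

def Spec_apply_ffill (row : List (Option String)) (ff : List (Int × String)) (ff_cols : List Int) (out : List (Option String)) : Prop := out = apply_ffill_alt row ff ff_cols
instance (row : List (Option String)) (ff : List (Int × String)) (ff_cols : List Int) (out : List (Option String)) : Decidable (Spec_apply_ffill row ff ff_cols out) := by unfold Spec_apply_ffill; infer_instance

-- ===== CLAIM (what is proved, stated in full; the proofs are below) =====
def Claim_equal_apply_ffill : Prop := ∀ (row : List (Option String)) (ff : List (Int × String)) (ff_cols : List Int), Dom_apply_ffill row ff ff_cols → Pre_apply_ffill row ff ff_cols → Spec_apply_ffill row ff ff_cols (apply_ffill row ff ff_cols)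

-- ===== LEMMAS AND PROOFS =====

theorem foldl_max_comm (t : List Int) (a b : Int) : t.foldl max (max a b) = max a (t.foldl max b) := by
  induction t generalizing b with
  | nil => rfl
  | cons c t ih => rw [List.foldl_cons, List.foldl_cons, max_assoc, ih]

-- the running maximum equals A's max(ff_cols)-based extension length
theorem pvExtLenB_eq (cols : List Int) (a : Int) (ha : 0 ≤ a) :
    pvExtLenB a cols
      = if a ≤ PySem.List.maxD cols (fun x => x) (-1) then
          PySem.List.maxD cols (fun x => x) (-1) + 1 else a := by
  induction cols generalizing a with
  | nil =>
    have h0 : PySem.List.maxD ([] : List Int) (fun x => x) (-1) = -1 := by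
      simp [PySem.List.maxD, PySem.List.max?]
    rw [show pvExtLenB a [] = a from rfl, h0]
    split_ifs <;> omega
  | cons c t ih =>
    rw [show pvExtLenB a (c :: t) = pvExtLenB (if a < c + 1 then c + 1 else a) t from rfl,
      ih _ (by split_ifs <;> omega)]
    cases t with
    | nil =>
      have h0 : PySem.List.maxD ([] : List Int) (fun x => x) (-1) = -1 := by
        simp [PySem.List.maxD, PySem.List.max?]
      have h1 : PySem.List.maxD [c] (fun x => x) (-1) = c := by
        simp [PySem.List.maxD, PySem.List.max?_id_cons]
      rw [h0, h1]
      split_ifs <;> omega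
    | cons d t' =>
      have h1 : PySem.List.maxD (c :: d :: t') (fun x => x) (-1) = (d :: t').foldl max c := by
        simp [PySem.List.maxD, PySem.List.max?_id_cons]
      have h2 : PySem.List.maxD (d :: t') (fun x => x) (-1) = t'.foldl max d := by
        simp [PySem.List.maxD, PySem.List.max?_id_cons]
      have h3 : (d :: t').foldl max c = max c (t'.foldl max d) := by
        rw [List.foldl_cons, foldl_max_comm]
      rw [h1, h2, h3]
      split_ifs <;> omega

theorem get?_pvClearRestA (rest : List Int) (ff : PySem.Dict Int String) (κ : Int) :
    (pvClearRestA ff rest).get? κ = if κ ∈ rest then some "" else ff.get? κ := by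
  induction rest generalizing ff with
  | nil => simp [pvClearRestA]
  | cons c rest ih =>
    simp only [pvClearRestA, List.foldl_cons] at *
    rw [ih]
    by_cases hκ : κ ∈ rest <;> by_cases hc : κ = c <;>
      simp [hκ, hc, PySem.Dict.get?_insert]

theorem ffLoop_agree (nr : List (Option String)) (cols : List Int)
    (ffA ffB : PySem.Dict Int String) (seen : Bool)
    (h : ∀ κ, ffA.get? κ = if seen = true ∧ κ ∈ cols then some "" else ffB.get? κ) :
    ∀ κ, (pvFfLoopA nr ffA cols).get? κ = (pvFfLoopB nr (ffB, seen) cols).1.get? κ := by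
  induction cols generalizing ffA ffB seen with
  | nil =>
    intro κ
    have := h κ
    simpa [pvFfLoopA, pvFfLoopB] using this
  | cons col rest ih =>
    intro κ
    simp only [pvFfLoopA, pvFfLoopB]
    cases hveq : PySem.List.pyGetD nr col none with
    | none =>
      -- empty cell (None): neither program fires
      simp only [hveq, ne_eq, not_true_eq_false, false_and, if_false, reduceCtorEq]
      cases seen with
      | true =>
        refine ih _ _ true ?_ κ
        intro κ'
        have := h κ'
        by_cases hm : κ' ∈ rest
        · simp [hm] at this ⊢; exact this
        · by_cases hk : κ' = col
          · subst hk
            simp [hm] at this ⊢; exact this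
          · simp [hm, hk, PySem.Dict.get?_insert] at this ⊢; exact this
      | false =>
        refine ih _ _ false ?_ κ
        intro κ'
        have := h κ'
        simpa using this
    | some t =>
      simp only [hveq, ne_eq, reduceCtorEq, not_false_eq_true, true_and, Option.getD_some]
      by_cases hfire : PySem.Str.strip t = ""
      · -- cell strips to "": neither program fires
        simp only [hfire, ne_eq, not_true_eq_false, if_false]
        cases seen with
        | true =>
          simp only [if_pos rfl]
          refine ih _ _ true ?_ κ
          intro κ'
          have := h κ'
          by_cases hm : κ' ∈ rest
          · simp [hm] at this ⊢; exact this
          · by_cases hk : κ' = col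
            · subst hk
              simp [hm] at this ⊢; exact this
            · simp [hm, hk, PySem.Dict.get?_insert] at this ⊢; exact this
        | false =>
          simp only [Bool.false_eq_true, if_false]
          refine ih _ _ false ?_ κ
          intro κ'
          have := h κ'
          simpa using this
      · -- non-empty cell: A inserts then clears the rest; B inserts and sets seen
        simp only [hfire, ne_eq, not_false_eq_true, if_true, if_pos]
        refine ih _ _ true ?_ κ
        intro κ'
        rw [get?_pvClearRestA]
        by_cases hm : κ' ∈ rest
        · simp [hm]
        · by_cases hk : κ' = col
          · subst hk
            simp [hm]
          · have := h κ'
            simp [hm, hk, PySem.Dict.get?_insert] at this ⊢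
            cases seen <;> simp_all

-- A's fill fold and B's fill recursion build the same row when the dicts agree on getD
theorem fillLoop_agree (ffA ffB : PySem.Dict Int String) (cols : List Int)
    (nr : List (Option String))
    (h : ∀ c, ffA.getD c "" = ffB.getD c "") :
    pvFillLoopA ffA cols nr = pvFillLoopB ffB cols nr := by
  induction cols generalizing nr with
  | nil => simp [pvFillLoopA, pvFillLoopB]
  | cons c rest ih =>
    simp only [pvFillLoopA, List.foldl_cons, pvFillLoopB] at *
    rw [← ih]
    congr 1
    cases hv : PySem.List.pyGetD nr c none with
    | none => simp [h c]
    | some t =>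
      by_cases ht : PySem.Str.strip t = "" <;> simp [ht, h c]

theorem loops_agree (nr : List (Option String)) (cols : List Int) (ff0 : List (Int × String)) :
    pvFillLoopA (pvFfLoopA nr (PySem.Dict.ofList ff0) cols) cols nr
      = pvFillLoopB (pvFfLoopB nr (PySem.Dict.ofList ff0, false) cols).1 cols nr := by
  apply fillLoop_agree
  intro c
  rw [PySem.Dict.getD_eq_get?_getD, PySem.Dict.getD_eq_get?_getD,
    ffLoop_agree nr cols (PySem.Dict.ofList ff0) (PySem.Dict.ofList ff0) false (by intro κ; simp)]

-- ===== VERDICT (by name: the statement is the Claim_ definition above) =====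
theorem apply_ffill_spec : Claim_equal_apply_ffill := by
  intro row ff ff_cols _dom _pre
  unfold Spec_apply_ffill apply_ffill apply_ffill_alt
  have hmax : (match PySem.List.max? ff_cols (fun x => x) with
      | some m => m
      | none => -1) = PySem.List.maxD ff_cols (fun x => x) (-1) := by
    unfold PySem.List.maxD
    cases PySem.List.max? ff_cols (fun x => x) <;> rfl
  have hL := pvExtLenB_eq ff_cols (row.length : Int) (by positivity)
  have hrow : (if (row.length : Int) ≤ PySem.List.maxD ff_cols (fun x => x) (-1) then
      row ++ List.replicate (PySem.List.maxD ff_cols (fun x => x) (-1) + 1 - (row.length : Int)).toNat (none : Option String)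
    else row)
      = row ++ List.replicate (pvExtLenB (row.length : Int) ff_cols - (row.length : Int)).toNat none := by
    rw [hL]
    split_ifs with hc
    · rfl
    · simp
  simp only [hmax]
  rw [hrow]
  exact loops_agree _ ff_cols ff
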